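-- pv_equiv track=rewrite | github.com/backupassure/proxmigrate | apps/lxc/views.py | _find_next_mp_slot
-- ===== SOURCE A (Python) =====
-- def _find_next_mp_slot(raw_config):
--     """Find the next available mpN slot (0-255)."""
--     used = set()
--     for key in raw_config:
--         if key.startswith("mp") and key[2:].isdigit():
--             used.add(int(key[2:]))
--     for n in range(256):
--         if n not in used:
--             return f"mp{n}"
--     return None
-- ===== SOURCE B (Python) =====
-- def _find_next_mp_slot(raw_config):
--     """Find the next available mpN slot (0-255)."""
--     idxs = sorted(int(k[2:]) for k in raw_config
--                   if k.startswith("mp") and k[2:].isdigit())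
--     expected = 0
--     for v in idxs:
--         if v == expected:
--             expected += 1
--         elif v > expected:
--             break
--         # v < expected: duplicate, skip
--     return f"mp{expected}" if expected < 256 else None
-- ===== Notes on version B (the rewrite author's own statement) =====
-- stated objective: alternative
-- what changed: Replaces A's set-build plus membership probe over all of range(256) with collecting the parsed indices into a sorted list and a single ordered scan with an 'expected' counter that stops at the first gap (capped at 256).
import Mathlib
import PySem

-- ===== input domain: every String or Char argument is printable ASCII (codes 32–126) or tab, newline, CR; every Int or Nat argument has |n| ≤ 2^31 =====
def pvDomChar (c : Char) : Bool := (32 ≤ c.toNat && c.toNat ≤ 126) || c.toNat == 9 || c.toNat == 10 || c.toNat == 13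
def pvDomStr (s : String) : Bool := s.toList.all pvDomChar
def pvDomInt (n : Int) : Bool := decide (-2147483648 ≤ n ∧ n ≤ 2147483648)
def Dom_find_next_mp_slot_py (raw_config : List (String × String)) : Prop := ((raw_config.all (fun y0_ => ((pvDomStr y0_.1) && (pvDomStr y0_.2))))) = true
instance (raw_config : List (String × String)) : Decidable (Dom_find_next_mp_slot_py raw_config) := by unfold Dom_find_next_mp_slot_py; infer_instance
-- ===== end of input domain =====

-- B replaces A's set-build plus probe over range(256) with a sort of the parsed
-- indices and one ordered scan for the first gap; alternative algorithm, not claimed faster.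

-- ===== PORT A =====
-- key.startswith("mp") and key[2:].isdigit()
def pvCondA (key : String) : Bool :=
  PySem.Str.startswith key "mp" && PySem.Str.strIsdigit (PySem.Str.slice key (some 2) none)

-- int(key[2:]); total form — only used when pvCondA holds (digits, so the parse succeeds)
def pvValA (key : String) : Int :=
  (PySem.Int.ofStr? (PySem.Str.slice key (some 2) none)).getD 0

-- f"mp{n}"
def pvFmt (n : Int) : String := String.ofList ('m' :: 'p' :: PySem.Int.toChars n)

-- the second loop of A: first n with n not in used
def pvProbeA (used : PySem.Set Int) : List Int → Option String
  | [] => none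
  | n :: rest => if used.contains n then pvProbeA used rest else some (pvFmt n)

def find_next_mp_slot_py (raw_config : List (String × String)) : Option String :=
  let used : PySem.Set Int :=
    raw_config.foldl (fun used kv =>
      if pvCondA kv.1 then PySem.Set.add used (pvValA kv.1) else used) PySem.Set.empty
  pvProbeA used (PySem.List.pyRange 0 256 1)

-- ===== PORT B =====
-- the scan: advance expected past equal values, skip duplicates, break at the first gap
def pvScanGap : List Int → Int → Int
  | [], e => e
  | v :: rest, e =>
      if v = e then pvScanGap rest (e + 1)
      else if v > e then e
      else pvScanGap rest e

def find_next_mp_slot_py_alt (raw_config : List (String × String)) : Option String :=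
  let idxs : List Int :=
    PySem.List.sorted
      (raw_config.filterMap (fun kv => if pvCondA kv.1 then some (pvValA kv.1) else none))
      (fun x => x) false
  let expected := pvScanGap idxs 0
  if expected < 256 then some (pvFmt expected) else none

-- ===== PRECONDITION & SPEC =====
def Spec_find_next_mp_slot_py (raw_config : List (String × String)) (out : Option String) : Prop := out = find_next_mp_slot_py_alt raw_config
instance (raw_config : List (String × String)) (out : Option String) : Decidable (Spec_find_next_mp_slot_py raw_config out) := by unfold Spec_find_next_mp_slot_py; infer_instance

-- ===== CLAIM (what is proved, stated in full; the proofs are below) =====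
def Claim_equal_find_next_mp_slot_py : Prop := ∀ (raw_config : List (String × String)), Dom_find_next_mp_slot_py raw_config → Spec_find_next_mp_slot_py raw_config (find_next_mp_slot_py raw_config)

-- ===== LEMMAS AND PROOFS =====

-- the parsed index list both ports work from
def pvIdxs (rc : List (String × String)) : List Int :=
  rc.filterMap (fun kv => if pvCondA kv.1 then some (pvValA kv.1) else none)

theorem pv_mem_fold (rc : List (String × String)) (s : PySem.Set Int) (n : Int) :
    n ∈ rc.foldl (fun used kv =>
      if pvCondA kv.1 then PySem.Set.add used (pvValA kv.1) else used) s ↔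
    n ∈ s ∨ n ∈ pvIdxs rc := by
  induction rc generalizing s with
  | nil => simp [pvIdxs]
  | cons kv rest ih =>
      simp only [List.foldl_cons]
      by_cases h : pvCondA kv.1 = true
      · rw [ih]
        simp [pvIdxs, h, PySem.Set.mem_add, or_assoc]
      · rw [ih]
        simp [pvIdxs, h]

theorem pv_scanGap_props (l : List Int) (hs : l.Pairwise (· ≤ ·)) (e : Int) :
    e ≤ pvScanGap l e ∧ pvScanGap l e ∉ l ∧
      ∀ m, e ≤ m → m < pvScanGap l e → m ∈ l := by
  induction l generalizing e with
  | nil => simp [pvScanGap]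
  | cons v rest ih =>
      obtain ⟨hv, hrest⟩ := List.pairwise_cons.mp hs
      by_cases h1 : v = e
      · subst h1
        obtain ⟨h₁, h₂, h₃⟩ := ih hrest (v + 1)
        have hscan : pvScanGap (v :: rest) v = pvScanGap rest (v + 1) := by
          simp [pvScanGap]
        rw [hscan]
        refine ⟨by omega, ?_, ?_⟩
        · simp only [List.mem_cons, not_or]
          exact ⟨by omega, h₂⟩
        · intro m hm1 hm2
          rcases eq_or_lt_of_le hm1 with h | h
          · simp [← h]
          · exact List.mem_cons_of_mem _ (h₃ m (by omega) hm2)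
      · by_cases h2 : v > e
        · have hscan : pvScanGap (v :: rest) e = e := by
            simp [pvScanGap, h1, h2]
          rw [hscan]
          refine ⟨le_rfl, ?_, ?_⟩
          · simp only [List.mem_cons, not_or]
            refine ⟨by omega, fun hmem => ?_⟩
            have := hv _ hmem
            omega
          · intro m hm1 hm2
            omega
        · obtain ⟨h₁, h₂, h₃⟩ := ih hrest e
          have hscan : pvScanGap (v :: rest) e = pvScanGap rest e := by
            simp [pvScanGap, h1, h2]
          rw [hscan]
          refine ⟨h₁, ?_, ?_⟩
          · simp only [List.mem_cons, not_or]
            exact ⟨by omega, h₂⟩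
          · intro m hm1 hm2
            exact List.mem_cons_of_mem _ (h₃ m hm1 hm2)

theorem pv_probe_some (used : PySem.Set Int) (g : Int)
    (hg : used.contains g = false)
    (a b : Int) (ha : a ≤ g) (hb : g < b)
    (hall : ∀ m, a ≤ m → m < g → used.contains m = true) :
    pvProbeA used (PySem.List.pyRange a b 1) = some (pvFmt g) := by
  have hlt : a < b := by omega
  rw [PySem.List.pyRange_one_cons hlt]
  rcases eq_or_lt_of_le ha with h | h
  · subst h
    simp only [pvProbeA, hg, Bool.false_eq_true, if_false]
  · simp only [pvProbeA, hall a le_rfl h, if_true]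
    exact pv_probe_some used g hg (a + 1) b (by omega) hb
      (fun m hm1 hm2 => hall m (by omega) hm2)
termination_by (b - a).toNat
decreasing_by omega

theorem pv_probe_none (used : PySem.Set Int) (a b : Int)
    (hall : ∀ m, a ≤ m → m < b → used.contains m = true) :
    pvProbeA used (PySem.List.pyRange a b 1) = none := by
  by_cases hlt : a < b
  · rw [PySem.List.pyRange_one_cons hlt]
    simp only [pvProbeA, hall a le_rfl hlt, if_true]
    exact pv_probe_none used (a + 1) b (fun m hm1 hm2 => hall m (by omega) hm2)
  · rw [PySem.List.pyRange_one_eq_nil (by omega)]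
    rfl
termination_by (b - a).toNat
decreasing_by omega

-- ===== VERDICT (by name: the statement is the Claim_ definition above) =====
theorem find_next_mp_slot_py_spec : Claim_equal_find_next_mp_slot_py := by
  intro rc _
  unfold Spec_find_next_mp_slot_py
  set used : PySem.Set Int := rc.foldl (fun used kv =>
      if pvCondA kv.1 then PySem.Set.add used (pvValA kv.1) else used) PySem.Set.empty with hused
  set S := PySem.List.sorted (pvIdxs rc) (fun x => x) false with hS
  have hA : find_next_mp_slot_py rc = pvProbeA used (PySem.List.pyRange 0 256 1) := rfl
  have hB : find_next_mp_slot_py_alt rc =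
      if pvScanGap S 0 < 256 then some (pvFmt (pvScanGap S 0)) else none := rfl
  have hmemS : ∀ n : Int, n ∈ S ↔ n ∈ pvIdxs rc := by
    intro n; rw [hS, PySem.List.mem_sorted]
  have hcont : ∀ n : Int, used.contains n = true ↔ n ∈ S := by
    intro n
    have hmf := pv_mem_fold rc PySem.Set.empty n
    rw [← hused] at hmf
    rw [hmemS]
    simp only [PySem.Set.empty, List.not_mem_nil, false_or] at hmf
    rw [← hmf]
    simp [PySem.Set.contains]
  have hpw : S.Pairwise (· ≤ ·) := by
    have := PySem.List.sorted_pairwise (xs := pvIdxs rc) (key := fun x => x)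
    rw [← hS] at this
    simpa using this
  obtain ⟨hge, hnot, hall⟩ := pv_scanGap_props S hpw 0
  set g := pvScanGap S 0 with hg
  have hgc : used.contains g = false := by
    rw [← Bool.not_eq_true, hcont]
    exact hnot
  rw [hA, hB]
  by_cases hlt : g < 256
  · rw [pv_probe_some used g hgc 0 256 hge hlt
      (fun m hm1 hm2 => (hcont m).mpr (hall m hm1 hm2))]
    rw [if_pos hlt]
  · rw [pv_probe_none used 0 256
      (fun m hm1 hm2 => (hcont m).mpr (hall m hm1 (by omega)))]
    rw [if_neg hlt]
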